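-- pv_equiv track=rewrite | github.com/cycleuser/leetcode | solutions/python3/955.py | minDeletionSize
-- ===== SOURCE A (Python) =====
-- from typing import List
--
-- def minDeletionSize(A: List[str]) -> int:
--     # 初始化结果计数器和当前列的状态
--     res = 0
--     cur = [""] * len(A)
--
--     # 遍历每一列（使用zip(*)对矩阵转置）
--     for col in zip(*A):
--         # 将当前列状态与新的一行进行比较并排序后对比
--         cur2 = list(zip(cur, col))
--         if cur2 == sorted(cur2):  # 如果保持顺序，则更新当前状态为排序后的结果，表明这一列不需要删除
--             cur = [x[0] for x in sorted(cur2)]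
--         else:
--             res += 1  # 若不是有序的，则说明需要删除该列以满足条件
--
--     return res  # 返回最终的结果计数
-- ===== SOURCE B (Python) =====
-- from typing import List
--
-- def minDeletionSize(A: List[str]) -> int:
--     # Row-pair traversal: collect offending column indices in a set.
--     W = min((len(r) for r in A), default=0)
--     bad = set()
--     for r in range(len(A) - 1):
--         x, y = A[r], A[r + 1]
--         for c in range(W):
--             if x[c] > y[c]:
--                 bad.add(c)
--     return len(bad)
-- ===== Notes on version B (the rewrite author's own statement) =====
-- stated objective: simpler
-- what changed: A transposes the matrix and, per column, pairs it with a dead all-empty state, sorts the pair list and compares; B drops the dead state entirely and instead scans adjacent row pairs, collecting offending column indices (below the shortest-row width) in a set and returning its size.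
import Mathlib
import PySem

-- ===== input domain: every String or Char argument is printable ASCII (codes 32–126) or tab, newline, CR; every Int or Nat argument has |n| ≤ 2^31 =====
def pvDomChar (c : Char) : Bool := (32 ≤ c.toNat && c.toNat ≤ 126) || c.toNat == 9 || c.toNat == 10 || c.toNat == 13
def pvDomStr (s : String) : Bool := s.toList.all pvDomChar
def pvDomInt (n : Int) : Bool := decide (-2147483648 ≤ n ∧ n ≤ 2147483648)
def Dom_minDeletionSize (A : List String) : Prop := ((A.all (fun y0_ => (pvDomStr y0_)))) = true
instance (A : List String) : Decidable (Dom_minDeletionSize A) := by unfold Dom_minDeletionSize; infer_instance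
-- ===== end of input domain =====

-- B replaces A's per-column zip/sort/compare (with a dead `cur` state) by a row-pair scan that
-- collects offending column indices in a set; objective: simpler (the dead state disappears).


-- ===== PORT A =====
-- zip(*A): the columns of the rows, truncated at the shortest row (exact: every produced index c
-- is below every row's length, so getD's default is never used).
def pyZipStar (rows : List (List Char)) : List (List Char) :=
  match rows with
  | [] => []
  | r :: rs =>
      (List.range (rs.foldl (fun m l => min m l.length) r.length)).map
        (fun c => rows.map (fun row => row.getD c ' '))

-- A's column entries are 1-character Python strings; comparing those is exactly comparing the
-- Chars by code point, so a column is a List Char and cur2 : List (String × Char).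
-- sorted(cur2) on the pairs is PySem.List.sorted2 with the two projections as tuple key.
def minDeletionSize (A : List String) : Int :=
  (List.foldl
    (fun (s : Int × List String) col =>
      let cur2 := s.2.zip col
      let sc := PySem.List.sorted2 cur2 Prod.fst Prod.snd false
      if cur2 = sc then (s.1, sc.map Prod.fst) else (s.1 + 1, s.2))
    (0, List.replicate A.length "")
    (pyZipStar (A.map String.toList))).1

-- ===== PORT B =====
def minDeletionSize_alt (A : List String) : Int :=
  let rows := A.map String.toList
  let W := PySem.List.minD (rows.map List.length) (fun x => x) 0
  let bad : PySem.Set Nat :=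
    (List.range (A.length - 1)).foldl
      (fun bad r =>
        let x := rows.getD r []
        let y := rows.getD (r + 1) []
        (List.range W).foldl
          (fun bad c => if y.getD c ' ' < x.getD c ' ' then PySem.Set.add bad c else bad)
          bad)
      PySem.Set.empty
  PySem.Set.len bad

-- ===== PRECONDITION & SPEC =====
def Spec_minDeletionSize (A : List String) (out : Int) : Prop := out = minDeletionSize_alt A
instance (A : List String) (out : Int) : Decidable (Spec_minDeletionSize A out) := by unfold Spec_minDeletionSize; infer_instance

-- ===== CLAIM (what is proved, stated in full; the proofs are below) =====
def Claim_equal_minDeletionSize : Prop := ∀ (A : List String), Dom_minDeletionSize A → Spec_minDeletionSize A (minDeletionSize A)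

-- ===== LEMMAS AND PROOFS =====

-- zipping a replicate of the right length just tags every element
theorem zip_replicate_eq_map (col : List Char) (s : String) :
    (List.replicate col.length s).zip col = col.map (fun c => (s, c)) := by
  induction col with
  | nil => rfl
  | cons c t ih => simpa [List.replicate_succ] using ih

-- insertBy with two tests that agree on all involved elements
theorem insertBy_congr_empty_fst (b1 b2 : (String × Char) → (String × Char) → Bool)
    (hb : ∀ a c, a.1 = "" → c.1 = "" → b1 a c = b2 a c)
    (x : String × Char) (hx : x.1 = "") :
    ∀ (ys : List (String × Char)), (∀ a ∈ ys, a.1 = "") →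
      PySem.List.insertBy b1 x ys = PySem.List.insertBy b2 x ys := by
  intro ys
  induction ys with
  | nil => intro _; rfl
  | cons y t ih =>
      intro hall
      have hy : y.1 = "" := hall y (by simp)
      have ht : ∀ a ∈ t, a.1 = "" := fun a ha => hall a (List.mem_cons_of_mem _ ha)
      simp only [PySem.List.insertBy, hb x y hx hy, ih ht]

theorem mem_empty_fst_insertBy (b : (String × Char) → (String × Char) → Bool)
    (x : String × Char) (hx : x.1 = "") (ys : List (String × Char))
    (hys : ∀ a ∈ ys, a.1 = "") :
    ∀ a ∈ PySem.List.insertBy b x ys, a.1 = "" := by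
  intro a ha
  rcases (PySem.List.mem_insertBy b x a ys).mp ha with rfl | h
  · exact hx
  · exact hys a h

theorem foldl_insertBy_congr_empty_fst (b1 b2 : (String × Char) → (String × Char) → Bool)
    (hb : ∀ a c, a.1 = "" → c.1 = "" → b1 a c = b2 a c) :
    ∀ (l acc : List (String × Char)), (∀ a ∈ l, a.1 = "") → (∀ a ∈ acc, a.1 = "") →
      l.foldl (fun acc x => PySem.List.insertBy b1 x acc) acc
        = l.foldl (fun acc x => PySem.List.insertBy b2 x acc) acc := by
  intro l
  induction l with
  | nil => intro acc _ _; rfl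
  | cons x t ih =>
      intro acc hl hacc
      have hx : x.1 = "" := hl x (by simp)
      have ht : ∀ a ∈ t, a.1 = "" := fun a ha => hl a (List.mem_cons_of_mem _ ha)
      simp only [List.foldl_cons, insertBy_congr_empty_fst b1 b2 hb x hx acc hacc]
      exact ih _ ht (mem_empty_fst_insertBy b2 x hx acc hacc)

-- on pairs whose first component is always "", sorted2 by (fst, snd) is sorted by snd
theorem sorted2_const_fst (col : List Char) :
    PySem.List.sorted2 (col.map (fun c => (("" : String), c))) Prod.fst Prod.snd false
      = PySem.List.sorted (col.map (fun c => (("" : String), c))) Prod.snd false := by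
  show (col.map (fun c => (("" : String), c))).foldl
      (fun acc x => PySem.List.insertBy
        (fun a b => decide (a.1 < b.1) || (!decide (b.1 < a.1) && decide (a.2 < b.2))) x acc) []
    = (col.map (fun c => (("" : String), c))).foldl
      (fun acc x => PySem.List.insertBy (fun a b => decide (a.2 < b.2)) x acc) []
  apply foldl_insertBy_congr_empty_fst
  · intro a c ha hc
    simp only [ha, hc, decide_eq_false (lt_irrefl ("" : String)), Bool.false_or,
      Bool.not_false, Bool.true_and]
  · intro a ha
    rcases List.mem_map.mp ha with ⟨c, _, rfl⟩; rfl
  · intro a ha; cases ha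

-- sorted-fixed-point characterisation
theorem sorted_fixed_iff (l : List (String × Char)) :
    (l = PySem.List.sorted l Prod.snd false) ↔ l.Pairwise (fun a b => a.2 ≤ b.2) := by
  constructor
  · intro h; rw [h]; exact PySem.List.sorted_pairwise l Prod.snd
  · intro h; exact (PySem.List.sorted_eq_self_of_pairwise l Prod.snd h).symm

-- A's loop counts the columns that are not non-decreasing; cur stays replicate "".
theorem a_loop (cols : List (List Char)) (n : Nat) (res : Int)
    (h : ∀ col ∈ cols, col.length = n) :
    (List.foldl
      (fun (s : Int × List String) col =>
        let cur2 := s.2.zip col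
        let sc := PySem.List.sorted2 cur2 Prod.fst Prod.snd false
        if cur2 = sc then (s.1, sc.map Prod.fst) else (s.1 + 1, s.2))
      (res, List.replicate n "") cols).1
    = res + (cols.countP (fun col => !decide (col.Pairwise (· ≤ ·))) : Int) := by
  induction cols generalizing res with
  | nil => simp
  | cons col t ih =>
      have hlen : col.length = n := h col (by simp)
      have ht : ∀ c ∈ t, c.length = n := fun c hc => h c (List.mem_cons_of_mem _ hc)
      have hz : (List.replicate n "").zip col = col.map (fun c => (("" : String), c)) := by
        rw [← hlen]; exact zip_replicate_eq_map col ""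
      rw [List.foldl_cons]
      dsimp only
      rw [hz, sorted2_const_fst]
      by_cases hp : col.Pairwise (· ≤ ·)
      · have hfix : col.map (fun c => (("" : String), c))
            = PySem.List.sorted (col.map (fun c => (("" : String), c))) Prod.snd false :=
          (sorted_fixed_iff _).mpr (by simpa [List.pairwise_map] using hp)
        rw [if_pos hfix]
        have hcur : (PySem.List.sorted (col.map (fun c => (("" : String), c))) Prod.snd false).map
            Prod.fst = List.replicate n "" := by
          rw [← hfix, List.map_map]
          rw [show ((Prod.fst ∘ fun c => (("" : String), c)) : Char → String) = fun _ => "" from rfl]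
          rw [List.map_const', hlen]
        rw [hcur, ih res ht]
        simp [hp]
      · have hne : ¬ (col.map (fun c => (("" : String), c))
            = PySem.List.sorted (col.map (fun c => (("" : String), c))) Prod.snd false) := by
          intro hcontra
          exact hp (by simpa [List.pairwise_map] using (sorted_fixed_iff _).mp hcontra)
        rw [if_neg hne, ih (res + 1) ht]
        simp [hp]
        ring

-- membership in B's inner fold
theorem inner_mem (l : List Nat) (p : Nat → Bool) (acc : PySem.Set Nat) (z : Nat) :
    (z ∈ l.foldl (fun b c => if p c then PySem.Set.add b c else b) acc)
      ↔ z ∈ acc ∨ (z ∈ l ∧ p z) := by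
  induction l generalizing acc with
  | nil => simp
  | cons c t ih =>
      simp only [List.foldl_cons, ih, List.mem_cons]
      by_cases hp : p c
      · simp only [hp, if_pos, PySem.Set.mem_add]
        constructor
        · rintro ((h | rfl) | ⟨h1, h2⟩)
          · exact Or.inl h
          · exact Or.inr ⟨Or.inl rfl, hp⟩
          · exact Or.inr ⟨Or.inr h1, h2⟩
        · rintro (h | ⟨rfl | h1, h2⟩)
          · exact Or.inl (Or.inl h)
          · exact Or.inl (Or.inr rfl)
          · exact Or.inr ⟨h1, h2⟩
      · simp only [hp]
        constructor
        · rintro (h | ⟨h1, h2⟩)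
          · exact Or.inl h
          · exact Or.inr ⟨Or.inr h1, h2⟩
        · rintro (h | ⟨rfl | h1, h2⟩)
          · exact Or.inl h
          · exact absurd h2 (by simpa using hp)
          · exact Or.inr ⟨h1, h2⟩

theorem inner_nodup (l : List Nat) (p : Nat → Bool) (acc : PySem.Set Nat) (h : acc.Nodup) :
    (l.foldl (fun b c => if p c then PySem.Set.add b c else b) acc).Nodup := by
  induction l generalizing acc with
  | nil => exact h
  | cons c t ih =>
      rw [List.foldl_cons]
      by_cases hp : p c
      · rw [if_pos hp]; exact ih _ (PySem.Set.nodup_add acc c h)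
      · rw [if_neg hp]; exact ih _ h

-- membership in B's nested fold
theorem outer_mem (l : List Nat) (W : Nat) (f : Nat → Nat → Bool) (acc : PySem.Set Nat) (z : Nat) :
    (z ∈ l.foldl (fun b r =>
        (List.range W).foldl (fun b c => if f r c then PySem.Set.add b c else b) b) acc)
      ↔ z ∈ acc ∨ (z < W ∧ ∃ r ∈ l, f r z) := by
  induction l generalizing acc with
  | nil => simp
  | cons r t ih =>
      simp only [List.foldl_cons, ih, inner_mem, List.mem_range, List.mem_cons,
        exists_eq_or_imp]
      tauto

theorem outer_nodup (l : List Nat) (W : Nat) (f : Nat → Nat → Bool) (acc : PySem.Set Nat)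
    (h : acc.Nodup) :
    (l.foldl (fun b r =>
        (List.range W).foldl (fun b c => if f r c then PySem.Set.add b c else b) b) acc).Nodup := by
  induction l generalizing acc with
  | nil => exact h
  | cons r t ih => exact ih _ (inner_nodup _ _ _ h)

-- a column of the truncated transpose is out of order iff some adjacent row pair witnesses it
theorem bridge (rows : List (List Char)) (c : Nat) :
    (!decide ((rows.map (fun row => row.getD c ' ')).Pairwise (· ≤ ·)))
      = (List.range (rows.length - 1)).any
          (fun r => decide ((rows.getD (r + 1) []).getD c ' ' < (rows.getD r []).getD c ' ')) := by
  have hget : ∀ (r : Nat) (hr : r < rows.length),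
      (rows.getD r []).getD c ' ' = (rows.map (fun row => row.getD c ' '))[r]'(by simpa using hr) := by
    intro r hr
    rw [List.getD_eq_getElem rows [] hr, List.getElem_map]
  rcases Bool.eq_false_or_eq_true (!decide ((rows.map (fun row => row.getD c ' ')).Pairwise (· ≤ ·)))
    with hb | hb
  · rw [hb]
    symm
    rw [List.any_eq_true]
    have hnp : ¬ (rows.map (fun row => row.getD c ' ')).Pairwise (· ≤ ·) := by
      simpa using hb
    by_contra hno
    push Not at hno
    apply hnp
    apply (List.isChain_iff_pairwise (R := fun a b : Char => a ≤ b)).mp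
    rw [List.isChain_iff_getElem]
    intro i hi
    have hi' : i + 1 < rows.length := by simpa using hi
    have hmem : i ∈ List.range (rows.length - 1) := List.mem_range.mpr (by omega)
    have := hno i hmem
    rw [hget i (by omega), hget (i + 1) hi'] at this
    simpa using le_of_not_gt (by simpa using this)
  · rw [hb]
    symm
    rw [List.any_eq_false]
    intro r hr
    have hps : (rows.map (fun row => row.getD c ' ')).Pairwise (· ≤ ·) := by
      simpa using hb
    have hch := (List.isChain_iff_pairwise
      (R := fun a b : Char => a ≤ b)).mpr hps
    have hr' : r + 1 < rows.length := by
      have := List.mem_range.mp hr; omega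
    have := (List.isChain_iff_getElem.mp hch) r (by simpa using hr')
    rw [hget r (by omega), hget (r + 1) hr']
    simpa using this

-- the whole equivalence, stated over the char rows of a nonempty input
theorem main_eq (r : List Char) (rs : List (List Char)) :
    (List.foldl
      (fun (s : Int × List String) col =>
        let cur2 := s.2.zip col
        let sc := PySem.List.sorted2 cur2 Prod.fst Prod.snd false
        if cur2 = sc then (s.1, sc.map Prod.fst) else (s.1 + 1, s.2))
      (0, List.replicate (r :: rs).length "") (pyZipStar (r :: rs))).1
    = PySem.Set.len
        ((List.range ((r :: rs).length - 1)).foldl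
          (fun bad i =>
            (List.range (PySem.List.minD ((r :: rs).map List.length) (fun x => x) 0)).foldl
              (fun bad c =>
                if ((r :: rs).getD (i + 1) []).getD c ' ' < ((r :: rs).getD i []).getD c ' '
                  then PySem.Set.add bad c else bad)
              bad)
          PySem.Set.empty) := by
  set rows : List (List Char) := r :: rs with hrows
  -- the two versions of the common width agree
  have hWB : PySem.List.minD (rows.map List.length) (fun x => x) 0
      = (rs.map List.length).foldl min r.length := by
    rw [hrows]
    show PySem.List.minD (r.length :: rs.map List.length) (fun x => x) 0 = _
    rw [PySem.List.minD, PySem.List.min?_id_cons]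
    rfl
  set W : Nat := (rs.map List.length).foldl min r.length with hWdef
  have hWA : rs.foldl (fun m l => min m l.length) r.length = W := by
    rw [hWdef, List.foldl_map]
  have hW : ∀ row ∈ rows, W ≤ row.length := by
    intro row hrow
    rcases List.mem_cons.mp hrow with rfl | hrow
    · exact (PySem.List.foldl_min_le (rs.map List.length) row.length).1
    · exact (PySem.List.foldl_min_le (rs.map List.length) r.length).2 _
        (List.mem_map_of_mem hrow)
  -- A's side: count of unsorted columns
  have hcols : pyZipStar rows
      = (List.range W).map (fun c => rows.map (fun row => row.getD c ' ')) := by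
    rw [hrows]; show (List.range (rs.foldl (fun m l => min m l.length) r.length)).map _ = _
    rw [hWA]
  have hlenA : ∀ col ∈ pyZipStar rows, col.length = rows.length := by
    intro col hcol
    rw [hcols] at hcol
    rcases List.mem_map.mp hcol with ⟨c, _, rfl⟩
    exact List.length_map ..
  have hA := a_loop (pyZipStar rows) rows.length 0 hlenA
  rw [hA, hcols, List.countP_map]
  -- B's side: the set of offending columns
  set f : Nat → Nat → Bool :=
    fun i c => decide ((rows.getD (i + 1) []).getD c ' ' < (rows.getD i []).getD c ' ') with hf
  have hshape : (List.range (rows.length - 1)).foldl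
      (fun bad i =>
        (List.range (PySem.List.minD (rows.map List.length) (fun x => x) 0)).foldl
          (fun bad c =>
            if (rows.getD (i + 1) []).getD c ' ' < (rows.getD i []).getD c ' '
              then PySem.Set.add bad c else bad)
          bad)
      PySem.Set.empty
      = (List.range (rows.length - 1)).foldl
        (fun b i => (List.range W).foldl
          (fun b c => if f i c then PySem.Set.add b c else b) b)
        PySem.Set.empty := by
    rw [hWB]
    simp only [hf, decide_eq_true_eq]
  rw [hshape]
  set bad := (List.range (rows.length - 1)).foldl
      (fun b i => (List.range W).foldl
        (fun b c => if f i c then PySem.Set.add b c else b) b)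
      PySem.Set.empty with hbad
  have hnd : bad.Nodup := outer_nodup _ W f PySem.Set.empty List.nodup_nil
  set q : Nat → Bool := fun z => (List.range (rows.length - 1)).any (fun i => f i z) with hq
  have hperm : bad.Perm ((List.range W).filter q) := by
    rw [List.perm_ext_iff_of_nodup hnd (List.Nodup.filter q (List.nodup_range))]
    intro z
    rw [hbad, outer_mem, List.mem_filter, List.mem_range, hq, List.any_eq_true]
    simp [PySem.Set.empty]
  have hlen : PySem.Set.len bad = ((List.range W).countP q : Int) := by
    rw [PySem.Set.len, hperm.length_eq, List.countP_eq_length_filter]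
  rw [hlen, zero_add, Int.natCast_inj]
  apply List.countP_congr
  intro c _
  have hb := bridge rows c
  rw [Function.comp_apply, hb, hq]

-- ===== VERDICT (by name: the statement is the Claim_ definition above) =====
theorem minDeletionSize_spec : Claim_equal_minDeletionSize := by
  intro A _
  unfold Spec_minDeletionSize minDeletionSize minDeletionSize_alt
  rcases A with _ | ⟨a, as⟩
  · rfl
  · rw [show (a :: as).length = ((a :: as).map String.toList).length from
      (List.length_map ..).symm]
    exact main_eq a.toList (as.map String.toList)
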